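-- pv_equiv track=rewrite | github.com/ironsubhajit/CodeChef | November_Long_Challenge_2021/CheaperFuel.py | cheapFuel
-- ===== SOURCE A (Python) =====
-- def cheapFuel(x, y, a, b, k):
--     if x > y and a > b:
--         return "DIESEL"
--     elif x < y and a < b:
--         return "PETROL"
--     elif x == y and a == b:
--         return "SAME PRICE"
--     else:
--         for i in range(k):
--             x += a
--             y += b
--         if x < y:
--             return "PETROL"
--         elif x > y:
--             return "DIESEL"
--         else:
--             return "SAME PRICE"
-- ===== SOURCE B (Python) =====
-- def cheapFuel(x, y, a, b, k):
--     t = k if k > 0 else 0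
--     xf = x + a * t
--     yf = y + b * t
--     if xf < yf:
--         return "PETROL"
--     if xf > yf:
--         return "DIESEL"
--     return "SAME PRICE"
-- ===== Notes on version B (the rewrite author's own statement) =====
-- stated objective: faster
-- what changed: Replaces the O(k) increment loop (and A's three pre-checks) with a single closed-form comparison of x+a*max(k,0) vs y+b*max(k,0).
import Mathlib
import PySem

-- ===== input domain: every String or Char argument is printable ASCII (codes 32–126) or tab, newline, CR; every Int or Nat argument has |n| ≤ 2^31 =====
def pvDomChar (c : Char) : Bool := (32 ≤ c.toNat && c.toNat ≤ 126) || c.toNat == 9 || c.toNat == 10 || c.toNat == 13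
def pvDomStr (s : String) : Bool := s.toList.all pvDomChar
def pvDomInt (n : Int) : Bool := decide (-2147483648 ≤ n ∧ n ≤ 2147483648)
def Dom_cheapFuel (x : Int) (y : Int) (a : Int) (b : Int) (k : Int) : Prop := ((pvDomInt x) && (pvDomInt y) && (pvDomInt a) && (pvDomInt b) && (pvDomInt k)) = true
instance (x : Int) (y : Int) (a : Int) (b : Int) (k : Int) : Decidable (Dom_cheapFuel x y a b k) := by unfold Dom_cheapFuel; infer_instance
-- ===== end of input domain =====

-- B replaces A's O(k) increment loop with a closed-form O(1) comparison of the final prices.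


-- ===== PORT A =====
def cheapFuel (x : Int) (y : Int) (a : Int) (b : Int) (k : Int) : String :=
  if x > y ∧ a > b then "DIESEL"
  else if x < y ∧ a < b then "PETROL"
  else if x = y ∧ a = b then "SAME PRICE"
  else
    -- for i in range(k): x += a; y += b
    let p := (PySem.List.pyRange 0 k 1).foldl (fun (s : Int × Int) _ => (s.1 + a, s.2 + b)) (x, y)
    if p.1 < p.2 then "PETROL"
    else if p.1 > p.2 then "DIESEL"
    else "SAME PRICE"

-- ===== PORT B =====
def cheapFuel_alt (x : Int) (y : Int) (a : Int) (b : Int) (k : Int) : String :=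
  let t : Int := if k > 0 then k else 0
  let xf := x + a * t
  let yf := y + b * t
  if xf < yf then "PETROL"
  else if xf > yf then "DIESEL"
  else "SAME PRICE"

-- ===== PRECONDITION & SPEC =====
def Spec_cheapFuel (x : Int) (y : Int) (a : Int) (b : Int) (k : Int) (out : String) : Prop := out = cheapFuel_alt x y a b k
instance (x : Int) (y : Int) (a : Int) (b : Int) (k : Int) (out : String) : Decidable (Spec_cheapFuel x y a b k out) := by unfold Spec_cheapFuel; infer_instance

-- ===== CLAIM (what is proved, stated in full; the proofs are below) =====
def Claim_equal_cheapFuel : Prop := ∀ (x : Int) (y : Int) (a : Int) (b : Int) (k : Int), Dom_cheapFuel x y a b k → Spec_cheapFuel x y a b k (cheapFuel x y a b k)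

-- ===== LEMMAS AND PROOFS =====

-- A's loop body ignores the loop variable; folding it over any list adds a and b length-many times.
theorem foldl_add_const (a b : Int) (l : List Int) (x y : Int) :
    l.foldl (fun (s : Int × Int) _ => (s.1 + a, s.2 + b)) (x, y)
      = (x + a * l.length, y + b * l.length) := by
  induction l generalizing x y with
  | nil => simp
  | cons h t ih =>
      simp only [List.foldl_cons, ih, List.length_cons, Prod.mk.injEq]
      constructor <;> push_cast <;> ring

theorem cheapFuel_eq_alt (x y a b k : Int) : cheapFuel x y a b k = cheapFuel_alt x y a b k := by
  unfold cheapFuel cheapFuel_alt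
  have hfold := foldl_add_const a b (PySem.List.pyRange 0 k 1) x y
  have hlen : ((PySem.List.pyRange 0 k 1).length : Int) = if k > 0 then k else 0 := by
    rw [PySem.List.length_pyRange_one]
    split_ifs with h <;> omega
  rw [hfold, hlen]
  set t : Int := if k > 0 then k else 0 with ht
  have ht0 : 0 ≤ t := by rw [ht]; split_ifs <;> omega
  have key : ∀ (u v c d : Int), u > v → c > d → v + d * t < u + c * t := by
    intro u v c d hu hc
    nlinarith [mul_le_mul_of_nonneg_right (by omega : d + 1 ≤ c) ht0]
  by_cases h1 : x > y ∧ a > b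
  · have hgt := key x y a b h1.1 h1.2
    simp [h1, hgt, not_lt.mpr (le_of_lt hgt)]
  · by_cases h2 : x < y ∧ a < b
    · have hlt := key y x b a h2.1 h2.2
      simp [h1, h2, hlt]
    · by_cases h3 : x = y ∧ a = b
      · obtain ⟨hx, ha⟩ := h3
        subst hx ha
        simp
      · simp [h1, h2, h3]

-- ===== VERDICT (by name: the statement is the Claim_ definition above) =====
theorem cheapFuel_spec : Claim_equal_cheapFuel := by
  intro x y a b k _
  exact cheapFuel_eq_alt x y a b k
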